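-- pv_equiv track=rewrite | github.com/svjt78/ContentRunway | langgraph/contentrunway/agents/quality_gates.py | _generate_fact_check_recommendations
-- ===== SOURCE A (Python) =====
-- from typing import List, Dict, Any, Optional
--
-- def _generate_fact_check_recommendations(
--
--     verification_results: List[Dict[str, Any]],
--     unsupported_claims: List[str]
-- ) -> List[str]:
--     """Generate actionable recommendations for improving factual accuracy."""
--
--     recommendations = []
--
--     contradicted = [r for r in verification_results if r['status'] == 'CONTRADICTED']
--     if contradicted:
--         recommendations.append(f"Review and correct {len(contradicted)} contradicted claims")
--
--     insufficient = [r for r in verification_results if r['status'] in ['INSUFFICIENT', 'no_sources']]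
--     if insufficient:
--         recommendations.append(f"Find additional sources for {len(insufficient)} unverified claims")
--
--     if unsupported_claims:
--         recommendations.append(f"Add citations for {len(unsupported_claims)} potentially unsupported assertions")
--
--     partial = [r for r in verification_results if r['status'] == 'PARTIALLY_SUPPORTED']
--     if partial:
--         recommendations.append(f"Refine accuracy of {len(partial)} partially supported claims")
--
--     if not recommendations:
--         recommendations.append("Fact-check quality is good - no major issues identified")
--
--     return recommendations
-- ===== SOURCE B (Python) =====
-- def _generate_fact_check_recommendations(verification_results, unsupported_claims):
--     contradicted = insufficient = partial = 0
--     for r in verification_results: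
--         s = r['status']
--         if s == 'CONTRADICTED':
--             contradicted += 1
--         elif s == 'INSUFFICIENT' or s == 'no_sources':
--             insufficient += 1
--         elif s == 'PARTIALLY_SUPPORTED':
--             partial += 1
--     entries = [
--         (contradicted, "Review and correct ", " contradicted claims"),
--         (insufficient, "Find additional sources for ", " unverified claims"),
--         (len(unsupported_claims), "Add citations for ", " potentially unsupported assertions"),
--         (partial, "Refine accuracy of ", " partially supported claims"),
--     ]
--     recs = [f"{pre}{n}{suf}" for n, pre, suf in entries if n > 0]
--     return recs or ["Fact-check quality is good - no major issues identified"]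
-- ===== Notes on version B (the rewrite author's own statement) =====
-- stated objective: simpler
-- what changed: Replaces four separate filtering list comprehensions and four guarded appends with one counting pass (three counters in an if/elif chain) followed by a table-driven comprehension that formats every entry whose count is positive.
-- outside the precondition, e.g. on _generate_fact_check_recommendations([{}], []): A raises KeyError, B raises KeyError
import Mathlib
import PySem

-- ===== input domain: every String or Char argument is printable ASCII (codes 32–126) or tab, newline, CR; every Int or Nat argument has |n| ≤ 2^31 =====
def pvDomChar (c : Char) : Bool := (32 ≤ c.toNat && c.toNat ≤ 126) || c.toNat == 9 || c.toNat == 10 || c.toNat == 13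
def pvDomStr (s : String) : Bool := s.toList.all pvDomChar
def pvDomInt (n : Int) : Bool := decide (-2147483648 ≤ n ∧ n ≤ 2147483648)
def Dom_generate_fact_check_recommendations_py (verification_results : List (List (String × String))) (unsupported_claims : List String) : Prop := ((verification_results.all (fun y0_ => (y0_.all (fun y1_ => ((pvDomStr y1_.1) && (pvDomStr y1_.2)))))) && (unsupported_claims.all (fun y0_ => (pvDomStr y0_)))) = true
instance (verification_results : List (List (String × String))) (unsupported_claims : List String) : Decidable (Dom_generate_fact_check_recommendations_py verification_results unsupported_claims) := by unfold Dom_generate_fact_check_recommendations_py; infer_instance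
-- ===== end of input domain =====

-- One line: B replaces A's four filtering scans and guarded appends with a single counting
-- pass (three counters) and a table-driven comprehension over (count, prefix, suffix) entries.

-- ===== PORT A =====
-- literal transliteration of A: four list-comprehension filters, each guarded append
def generate_fact_check_recommendations_py (verification_results : List (List (String × String))) (unsupported_claims : List String) : List String :=
  let recommendations : List String := []
  let contradicted := verification_results.filter (fun r => List.lookup "status" r == some "CONTRADICTED")
  let recommendations := if contradicted ≠ [] then recommendations ++ ["Review and correct " ++ PySem.Int.toStr (contradicted.length : Int) ++ " contradicted claims"] else recommendations
  let insufficient := verification_results.filter (fun r => List.lookup "status" r == some "INSUFFICIENT" || List.lookup "status" r == some "no_sources")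
  let recommendations := if insufficient ≠ [] then recommendations ++ ["Find additional sources for " ++ PySem.Int.toStr (insufficient.length : Int) ++ " unverified claims"] else recommendations
  let recommendations := if unsupported_claims ≠ [] then recommendations ++ ["Add citations for " ++ PySem.Int.toStr (unsupported_claims.length : Int) ++ " potentially unsupported assertions"] else recommendations
  let partialL := verification_results.filter (fun r => List.lookup "status" r == some "PARTIALLY_SUPPORTED")
  let recommendations := if partialL ≠ [] then recommendations ++ ["Refine accuracy of " ++ PySem.Int.toStr (partialL.length : Int) ++ " partially supported claims"] else recommendations
  if recommendations = [] then ["Fact-check quality is good - no major issues identified"] else recommendations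

-- ===== PORT B =====
-- literal transliteration of B: one fold tallying three counters via an if/elif chain,
-- then a filter+map over the literal entry table.  (Pre_ guarantees the "status" key is
-- present, so reading it via getD "" is exact: "" never equals any tested status.)
def pvTallyStep (acc : Int × Int × Int) (r : List (String × String)) : Int × Int × Int :=
  let s := (List.lookup "status" r).getD ""
  if s == "CONTRADICTED" then (acc.1 + 1, acc.2.1, acc.2.2)
  else if s == "INSUFFICIENT" || s == "no_sources" then (acc.1, acc.2.1 + 1, acc.2.2)
  else if s == "PARTIALLY_SUPPORTED" then (acc.1, acc.2.1, acc.2.2 + 1)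
  else acc

def generate_fact_check_recommendations_py_alt (verification_results : List (List (String × String))) (unsupported_claims : List String) : List String :=
  let t := verification_results.foldl pvTallyStep (0, 0, 0)
  let entries : List (Int × String × String) :=
    [ (t.1,     "Review and correct ",          " contradicted claims"),
      (t.2.1,   "Find additional sources for ", " unverified claims"),
      ((unsupported_claims.length : Int), "Add citations for ", " potentially unsupported assertions"),
      (t.2.2,   "Refine accuracy of ",          " partially supported claims") ]
  let recs := (entries.filter (fun e => 0 < e.1)).map (fun e => e.2.1 ++ PySem.Int.toStr e.1 ++ e.2.2)
  if recs = [] then ["Fact-check quality is good - no major issues identified"] else recs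

-- ===== PRECONDITION & SPEC =====
-- Pre_ excludes only inputs where some result dict lacks the 'status' key: there
-- Python A (and Python B) raise KeyError, so no value is claimed.
def Pre_generate_fact_check_recommendations_py (verification_results : List (List (String × String))) (_unsupported_claims : List String) : Prop :=
  ∀ r ∈ verification_results, (List.lookup "status" r).isSome = true
instance (verification_results : List (List (String × String))) (unsupported_claims : List String) : Decidable (Pre_generate_fact_check_recommendations_py verification_results unsupported_claims) := by unfold Pre_generate_fact_check_recommendations_py; infer_instance
def pvWitness_generate_fact_check_recommendations_py : (List (List (String × String))) × List String :=
  ([[("status", "CONTRADICTED")], [("status", "SUPPORTED")]], ["claim one"])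

def Spec_generate_fact_check_recommendations_py (verification_results : List (List (String × String))) (unsupported_claims : List String) (out : List String) : Prop := out = generate_fact_check_recommendations_py_alt verification_results unsupported_claims
instance (verification_results : List (List (String × String))) (unsupported_claims : List String) (out : List String) : Decidable (Spec_generate_fact_check_recommendations_py verification_results unsupported_claims out) := by unfold Spec_generate_fact_check_recommendations_py; infer_instance

-- ===== CLAIM (what is proved, stated in full; the proofs are below) =====
def Claim_equal_generate_fact_check_recommendations_py : Prop := ∀ (verification_results : List (List (String × String))) (unsupported_claims : List String), Dom_generate_fact_check_recommendations_py verification_results unsupported_claims → Pre_generate_fact_check_recommendations_py verification_results unsupported_claims → Spec_generate_fact_check_recommendations_py verification_results unsupported_claims (generate_fact_check_recommendations_py verification_results unsupported_claims)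

-- ===== LEMMAS AND PROOFS =====

-- B's fold computes exactly the three filter lengths A materialises
theorem pv_fold_counts (vr : List (List (String × String))) (c i p : Int) :
    vr.foldl pvTallyStep (c, i, p)
      = (c + ((vr.filter (fun r => List.lookup "status" r == some "CONTRADICTED")).length : Int),
         i + ((vr.filter (fun r => List.lookup "status" r == some "INSUFFICIENT" || List.lookup "status" r == some "no_sources")).length : Int),
         p + ((vr.filter (fun r => List.lookup "status" r == some "PARTIALLY_SUPPORTED")).length : Int)) := by
  induction vr generalizing c i p with
  | nil => simp
  | cons r vr ih =>
    simp only [List.foldl_cons, List.filter_cons]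
    cases h : List.lookup "status" r with
    | none =>
      have : pvTallyStep (c, i, p) r = (c, i, p) := by simp [pvTallyStep, h]
      rw [this, ih]; simp [h]
    | some v =>
      by_cases h1 : v = "CONTRADICTED"
      · subst h1
        have : pvTallyStep (c, i, p) r = (c + 1, i, p) := by simp [pvTallyStep, h]
        rw [this, ih]; simp [h]; omega
      · by_cases h2 : v = "INSUFFICIENT" ∨ v = "no_sources"
        · have hs : ((Option.getD (some v) "" == "INSUFFICIENT") || (Option.getD (some v) "" == "no_sources")) = true := by
            rcases h2 with h2 | h2 <;> simp [h2]
          have : pvTallyStep (c, i, p) r = (c, i + 1, p) := by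
            simp only [pvTallyStep, h]
            rw [if_neg (by simpa using h1), if_pos hs]
          rw [this, ih]
          have hf : v = "INSUFFICIENT" ∨ v = "no_sources" := h2
          have hnp : v ≠ "PARTIALLY_SUPPORTED" := by rintro rfl; exact absurd h2 (by decide)
          rcases hf with hf | hf <;> subst hf <;> simp [h, h1, hnp] <;> omega
        · push_neg at h2
          obtain ⟨h2a, h2b⟩ := h2
          by_cases h3 : v = "PARTIALLY_SUPPORTED"
          · subst h3
            have : pvTallyStep (c, i, p) r = (c, i, p + 1) := by simp [pvTallyStep, h]
            rw [this, ih]; simp [h]; omega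
          · have : pvTallyStep (c, i, p) r = (c, i, p) := by simp [pvTallyStep, h, h1, h2a, h2b, h3]
            rw [this, ih]; simp [h, h1, h2a, h2b, h3]

-- ===== VERDICT (by name: the statement is the Claim_ definition above) =====
theorem generate_fact_check_recommendations_py_spec : Claim_equal_generate_fact_check_recommendations_py := by
  intro vr uc _ _
  unfold Spec_generate_fact_check_recommendations_py
  unfold generate_fact_check_recommendations_py generate_fact_check_recommendations_py_alt
  rw [pv_fold_counts vr 0 0 0]
  simp only [zero_add]
  by_cases hc : (vr.filter (fun r => List.lookup "status" r == some "CONTRADICTED")) = [] <;>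
  by_cases hi : (vr.filter (fun r => List.lookup "status" r == some "INSUFFICIENT" || List.lookup "status" r == some "no_sources")) = [] <;>
  by_cases hu : uc = [] <;>
  by_cases hp : (vr.filter (fun r => List.lookup "status" r == some "PARTIALLY_SUPPORTED")) = [] <;>
    simp [hc, hi, hu, hp, List.filter, List.length_pos_iff]
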